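-- pv_equiv track=rewrite | github.com/jaked0626/CMSC121 | se3/se3.py | construct_cands_by_state
-- ===== SOURCE A (Python) =====
-- def construct_cands_by_state(candidates):
-- 	"""
-- 	Construct a mapping from states to the candidates from that state.
--
-- 	Inputs:
-- 	  candidates: list of candidate dictionaries
--
-- 	Returns: dictionary that maps a state abbreviation (string) to a
-- 	 list of dictionaries for candidates from that state.
-- 	"""
--
-- 	### EXERCISE 5 -- Replace pass with your code
--
-- 	d = {}
-- 	for entry in candidates:
-- 		state = entry["State"]
-- 		if state not in d:
-- 			candidates_per_state = [entry]
-- 			d[state] = candidates_per_state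
-- 		else:
-- 			d[state].append(entry)
--
-- 	return d
-- ===== SOURCE B (Python) =====
-- def construct_cands_by_state(candidates):
-- 	"""Group candidates by their "State" field: two-pass — ordered distinct
-- 	states first, then one filter pass per state."""
-- 	states = dict.fromkeys(entry["State"] for entry in candidates)
-- 	return {s: [e for e in candidates if e["State"] == s] for s in states}
-- ===== Notes on version B (the rewrite author's own statement) =====
-- stated objective: alternative
-- what changed: Replaces A's single pass that grows a dict (insert-or-append per record) with a two-pass plan: first collect the distinct states in first-occurrence order (dict.fromkeys), then build each group with one filter pass over the whole list.
import Mathlib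
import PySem

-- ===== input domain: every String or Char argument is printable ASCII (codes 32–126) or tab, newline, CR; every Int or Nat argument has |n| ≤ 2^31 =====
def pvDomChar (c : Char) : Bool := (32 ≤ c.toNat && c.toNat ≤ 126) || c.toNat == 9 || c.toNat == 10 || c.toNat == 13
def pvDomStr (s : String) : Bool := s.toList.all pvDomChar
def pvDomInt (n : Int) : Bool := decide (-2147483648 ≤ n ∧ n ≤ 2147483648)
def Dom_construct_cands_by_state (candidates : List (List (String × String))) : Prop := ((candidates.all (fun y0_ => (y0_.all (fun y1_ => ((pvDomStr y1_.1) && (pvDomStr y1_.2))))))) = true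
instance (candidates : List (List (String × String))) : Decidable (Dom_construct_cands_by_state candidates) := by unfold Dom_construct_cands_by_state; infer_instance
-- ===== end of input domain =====

-- B replaces A's one-pass dict-building loop by a two-pass plan (ordered distinct states,
-- then one filter per state); objective: alternative decomposition, not faster.
-- ===== PORT A =====
-- entry["State"]: first-match lookup in the entry's association list; Pre_ guarantees the
-- key is present, so the .getD "" default is never the value used on admitted inputs.
def pvStateOf (entry : List (String × String)) : String :=
  ((PySem.Dict.mk entry).get? "State").getD ""

def construct_cands_by_state (candidates : List (List (String × String))) : List (String × List (List (String × String))) :=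
  (candidates.foldl
    (fun d entry =>
      let state := pvStateOf entry
      if d.contains state = false then
        d.insert state [entry]
      else
        d.modify state [] (fun l => l ++ [entry]))
    PySem.Dict.empty).items

-- ===== PORT B =====
def construct_cands_by_state_alt (candidates : List (List (String × String))) : List (String × List (List (String × String))) :=
  let states := PySem.List.dedup (candidates.map pvStateOf)
  states.map (fun s => (s, candidates.filter (fun e => pvStateOf e == s)))

-- ===== PRECONDITION & SPEC =====
-- Pre_ excludes exactly the inputs where some entry has no "State" key: there Python A
-- (and Python B) raise KeyError.
def Pre_construct_cands_by_state (candidates : List (List (String × String))) : Prop :=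
  ∀ e ∈ candidates, "State" ∈ e.map Prod.fst
instance (candidates : List (List (String × String))) : Decidable (Pre_construct_cands_by_state candidates) := by unfold Pre_construct_cands_by_state; infer_instance
def pvWitness_construct_cands_by_state : (List (List (String × String))) :=
  [[("State", "IL"), ("Name", "Ann")], [("State", "CA"), ("Name", "Bo")], [("State", "IL"), ("Name", "Cy")]]

def Spec_construct_cands_by_state (candidates : List (List (String × String))) (out : List (String × List (List (String × String)))) : Prop := out = construct_cands_by_state_alt candidates
instance (candidates : List (List (String × String))) (out : List (String × List (List (String × String)))) : Decidable (Spec_construct_cands_by_state candidates out) := by unfold Spec_construct_cands_by_state; infer_instance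

-- ===== CLAIM (what is proved, stated in full; the proofs are below) =====
def Claim_equal_construct_cands_by_state : Prop := ∀ (candidates : List (List (String × String))), Dom_construct_cands_by_state candidates → Pre_construct_cands_by_state candidates → Spec_construct_cands_by_state candidates (construct_cands_by_state candidates)

-- ===== LEMMAS AND PROOFS =====

-- A's branching step is the uniform dict 'modify with append' step.
theorem step_eq_modify (d : PySem.Dict String (List (List (String × String)))) (entry : List (String × String)) :
    (if d.contains (pvStateOf entry) = false then
        d.insert (pvStateOf entry) [entry]
      else
        d.modify (pvStateOf entry) [] (fun l => l ++ [entry]))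
      = d.modify (pvStateOf entry) [] (fun l => l ++ [entry]) := by
  by_cases h : d.contains (pvStateOf entry) = false
  · simp [h, PySem.Dict.modify, PySem.Dict.getD_of_not_contains d _ h]
  · simp [h]

theorem construct_cands_by_state_spec_aux (candidates : List (List (String × String))) :
    construct_cands_by_state candidates = construct_cands_by_state_alt candidates := by
  unfold construct_cands_by_state construct_cands_by_state_alt
  simp only [step_eq_modify]
  have hnd : (candidates.foldl
      (fun d entry => d.modify (pvStateOf entry) [] (fun l => l ++ [entry]))
      PySem.Dict.empty).keys.Nodup :=
    PySem.Dict.nodup_keys_foldl_modify_key candidates pvStateOf [] (fun _ e _ => _ ++ [e])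
      PySem.Dict.empty (by simp)
  rw [PySem.Dict.items_eq_map_keys _ hnd []]
  rw [PySem.Dict.keys_foldl_modify_key candidates pvStateOf [] (fun _ e l => l ++ [e]) PySem.Dict.empty]
  rw [PySem.List.dedup_eq_ofList]
  have hkeys : ∀ l : List String, PySem.Set.update
        (PySem.Dict.keys (PySem.Dict.empty (κ := String) (ν := List (List (String × String))))) l
      = PySem.Set.ofList l := fun _ => rfl
  rw [hkeys]
  apply List.map_congr_left
  intro s _
  congr 1
  -- the value stored at key s is the filter of candidates by state s
  have hfold : (candidates.foldl
        (fun d entry => d.modify (pvStateOf entry) [] (fun l => l ++ [entry]))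
        PySem.Dict.empty)
      = ((candidates.map (fun e => (pvStateOf e, e))).foldl
        (fun d p => d.modify p.1 [] (fun l => l ++ [p.2])) PySem.Dict.empty) := by
    rw [List.foldl_map]
  rw [hfold, PySem.Dict.getD_foldl_modify_append]
  simp [List.filter_map, Function.comp_def]

-- ===== VERDICT (by name: the statement is the Claim_ definition above) =====
theorem construct_cands_by_state_spec : Claim_equal_construct_cands_by_state := by
  intro candidates _ _
  exact construct_cands_by_state_spec_aux candidates
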